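-- pv_equiv track=rewrite | github.com/m31r0n/WMI-Parser-Forensic | src/wmi_forensics/class_carver.py | _grep_context
-- ===== SOURCE A (Python) =====
-- def _grep_context(lines: list[str], needle: str, context_lines: int) -> list[str]:
--     if not lines:
--         return []
--
--     idxs = [i for i, line in enumerate(lines) if needle.lower() in line.lower()]
--     if not idxs:
--         # Fallback when the hit is binary-adjacent but not in extracted strings.
--         return lines[: min(len(lines), 40)]
--
--     intervals: list[tuple[int, int]] = []
--     for i in idxs:
--         start = max(0, i - context_lines)
--         end = min(len(lines) - 1, i + context_lines)
--         intervals.append((start, end))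
--     merged = _merge_intervals(intervals)
--
--     out: list[str] = []
--     for start, end in merged:
--         out.extend(lines[start : end + 1])
--     return out
--
-- def _merge_intervals(intervals: list[tuple[int, int]]) -> list[tuple[int, int]]:
--     if not intervals:
--         return []
--     intervals = sorted(intervals)
--     merged: list[tuple[int, int]] = [intervals[0]]
--     for start, end in intervals[1:]:
--         last_start, last_end = merged[-1]
--         if start <= last_end + 1:
--             merged[-1] = (last_start, max(last_end, end))
--         else:
--             merged.append((start, end))
--     return merged
-- ===== SOURCE B (Python) =====
-- def _grep_context(lines: list[str], needle: str, context_lines: int) -> list[str]: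
--     if not lines:
--         return []
--     nl = needle.lower()
--     hits = [i for i, line in enumerate(lines) if nl in line.lower()]
--     if not hits:
--         return lines[: min(len(lines), 40)]
--     return [
--         line
--         for j, line in enumerate(lines)
--         if any(i - context_lines <= j <= i + context_lines for i in hits)
--     ]
-- ===== Notes on version B (the rewrite author's own statement) =====
-- stated objective: simpler
-- what changed: Replaced the build-intervals / sort / gap-merge / slice-concatenation pipeline by a single comprehension that keeps each line whose index lies within context_lines of some matching line, eliminating the _merge_intervals helper entirely.
-- intended difference: For context_lines < 0, when some line of index < -context_lines-1 matches and len(lines) >= -2*context_lines, A's slice lines[start:end+1] gets a negative stop that wraps around and A returns accidental slices from the tail of the list (e.g. ['c'] on (['a','b','c','d'],'a',-2)), while B returns [] — the intended result of an empty context window. — e.g. on _grep_context(["a", "b", "c", "d"], "a", -2): A returns ["c"], B returns []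
import Mathlib
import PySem

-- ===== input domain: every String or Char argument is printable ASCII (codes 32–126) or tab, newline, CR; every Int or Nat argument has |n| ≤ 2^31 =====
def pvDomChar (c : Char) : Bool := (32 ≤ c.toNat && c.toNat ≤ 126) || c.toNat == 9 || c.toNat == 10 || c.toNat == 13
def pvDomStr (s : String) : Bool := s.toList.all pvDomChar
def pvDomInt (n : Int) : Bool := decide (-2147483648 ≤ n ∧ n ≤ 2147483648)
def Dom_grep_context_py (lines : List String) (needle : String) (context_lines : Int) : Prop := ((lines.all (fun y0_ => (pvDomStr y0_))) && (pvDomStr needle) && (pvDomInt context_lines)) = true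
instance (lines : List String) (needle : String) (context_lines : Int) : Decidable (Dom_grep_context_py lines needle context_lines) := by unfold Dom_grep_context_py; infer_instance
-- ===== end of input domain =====

-- B replaces A's interval building + sort + gap-merge + slice concatenation by one comprehension
-- keeping each line whose index is within context_lines of some hit (simpler, not faster).

-- ===== PORT A =====
-- _merge_intervals: merged is kept most-recent-first (Python accesses/updates merged[-1]) and reversed at the end
def pvMergeIntervals (intervals : List (Int × Int)) : List (Int × Int) :=
  if intervals = [] then []
  else
    match PySem.List.sorted2 intervals Prod.fst Prod.snd false with
    | [] => []
    | first :: rest =>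
      (rest.foldl (fun merged se =>
        match merged with
        | [] => [se]
        | last :: tl =>
          if se.1 ≤ last.2 + 1 then (last.1, max last.2 se.2) :: tl
          else se :: last :: tl) [first]).reverse

def grep_context_py (lines : List String) (needle : String) (context_lines : Int) : List String :=
  if lines = [] then []
  else
    let idxs := ((PySem.List.enumerate lines).filter
        (fun p => PySem.Str.isIn (PySem.Str.lower needle) (PySem.Str.lower p.2))).map Prod.fst
    if idxs = [] then PySem.List.slice lines none (some (min (PySem.List.len lines) 40))
    else
      let intervals := idxs.foldl (fun acc i =>
        acc ++ [(max 0 (i - context_lines), min (PySem.List.len lines - 1) (i + context_lines))]) []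
      (pvMergeIntervals intervals).foldl
        (fun out se => out ++ PySem.List.slice lines (some se.1) (some (se.2 + 1))) []

-- ===== PORT B =====
def grep_context_py_alt (lines : List String) (needle : String) (context_lines : Int) : List String :=
  if lines = [] then []
  else
    let nl := PySem.Str.lower needle
    let hits := ((PySem.List.enumerate lines).filter
        (fun p => PySem.Str.isIn nl (PySem.Str.lower p.2))).map Prod.fst
    if hits = [] then PySem.List.slice lines none (some (min (PySem.List.len lines) 40))
    else ((PySem.List.enumerate lines).filter
        (fun p => hits.any (fun i =>
          decide (i - context_lines ≤ p.1) && decide (p.1 ≤ i + context_lines)))).map Prod.snd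

-- ===== PRECONDITION & SPEC =====
-- For context_lines < 0, when some line of index < -context_lines-1 matches and
-- len(lines) ≥ -2*context_lines, A's slice lines[start:end+1] gets a negative stop that wraps
-- around and A returns accidental slices from the tail of the list, while B returns [] —
-- the intended result of an empty context window.
def D_grep_context_py (lines : List String) (needle : String) (context_lines : Int) : Prop :=
  context_lines < 0 ∧ 2 * (-context_lines) ≤ (lines.length : Int) ∧
  ∃ p ∈ PySem.List.enumerate lines, p.1 < -context_lines - 1 ∧
    PySem.Str.isIn (PySem.Str.lower needle) (PySem.Str.lower p.2) = true
instance (lines : List String) (needle : String) (context_lines : Int) : Decidable (D_grep_context_py lines needle context_lines) := by unfold D_grep_context_py; infer_instance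

def Spec_grep_context_py (lines : List String) (needle : String) (context_lines : Int) (out : List String) : Prop := ¬ D_grep_context_py lines needle context_lines → out = grep_context_py_alt lines needle context_lines
instance (lines : List String) (needle : String) (context_lines : Int) (out : List String) : Decidable (Spec_grep_context_py lines needle context_lines out) := by unfold Spec_grep_context_py; infer_instance

def pvDiffWitness_grep_context_py : List String × String × Int := (["a", "b", "c", "d"], "a", -2)
def pvDiffWitnessOut_grep_context_py : (List String) × (List String) := (["c"], [])

-- ===== CLAIM (what is proved, stated in full; the proofs are below) =====
def Claim_unchanged_grep_context_py : Prop := ∀ (lines : List String) (needle : String) (context_lines : Int), Dom_grep_context_py lines needle context_lines → Spec_grep_context_py lines needle context_lines (grep_context_py lines needle context_lines)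
def Claim_changed_grep_context_py : Prop := Dom_grep_context_py (pvDiffWitness_grep_context_py.1) (pvDiffWitness_grep_context_py.2.1) (pvDiffWitness_grep_context_py.2.2) ∧ D_grep_context_py (pvDiffWitness_grep_context_py.1) (pvDiffWitness_grep_context_py.2.1) (pvDiffWitness_grep_context_py.2.2) ∧ grep_context_py (pvDiffWitness_grep_context_py.1) (pvDiffWitness_grep_context_py.2.1) (pvDiffWitness_grep_context_py.2.2) = pvDiffWitnessOut_grep_context_py.1 ∧ grep_context_py_alt (pvDiffWitness_grep_context_py.1) (pvDiffWitness_grep_context_py.2.1) (pvDiffWitness_grep_context_py.2.2) = pvDiffWitnessOut_grep_context_py.2 ∧ pvDiffWitnessOut_grep_context_py.1 ≠ pvDiffWitnessOut_grep_context_py.2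
def Claim_exact_grep_context_py : Prop := ∀ (lines : List String) (needle : String) (context_lines : Int), Dom_grep_context_py lines needle context_lines → D_grep_context_py lines needle context_lines → grep_context_py lines needle context_lines ≠ grep_context_py_alt lines needle context_lines

-- ===== LEMMAS AND PROOFS =====

theorem pv_eq_of_pairwise_lt_of_mem_iff {l1 l2 : List Int}
    (h1 : l1.Pairwise (· < ·)) (h2 : l2.Pairwise (· < ·))
    (h : ∀ x, x ∈ l1 ↔ x ∈ l2) : l1 = l2 := by
  induction l1 generalizing l2 with
  | nil =>
    cases l2 with
    | nil => rfl
    | cons b t => exact absurd ((h b).mpr (List.mem_cons_self ..)) (List.not_mem_nil)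
  | cons a t ih =>
    cases l2 with
    | nil => exact absurd ((h a).mp (List.mem_cons_self ..)) (List.not_mem_nil)
    | cons b s =>
      obtain ⟨ha1, hp1⟩ := List.pairwise_cons.mp h1
      obtain ⟨hb2, hp2⟩ := List.pairwise_cons.mp h2
      have hab : a = b := by
        rcases List.mem_cons.mp ((h a).mp (List.mem_cons_self ..)) with h' | h'
        · exact h'
        · rcases List.mem_cons.mp ((h b).mpr (List.mem_cons_self ..)) with h'' | h''
          · exact h''.symm
          · have := hb2 a h'; have := ha1 b h''; omega
      subst hab
      have htail : ∀ x, x ∈ t ↔ x ∈ s := by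
        intro x
        constructor
        · intro hx
          rcases List.mem_cons.mp ((h x).mp (List.mem_cons_of_mem _ hx)) with h' | h'
          · subst h'; exact absurd (ha1 x hx) (lt_irrefl x)
          · exact h'
        · intro hx
          rcases List.mem_cons.mp ((h x).mpr (List.mem_cons_of_mem _ hx)) with h' | h'
          · subst h'; exact absurd (hb2 x hx) (lt_irrefl x)
          · exact h'
      rw [ih hp1 hp2 htail]

theorem pv_foldl_insertBy_eq {α : Type} (before : α → α → Bool) :
    ∀ (xs acc : List α),
    (∀ x ∈ xs, ∀ y ∈ acc, before x y = false) →
    xs.Pairwise (fun a b => before b a = false) →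
    xs.foldl (fun acc x => PySem.List.insertBy before x acc) acc = acc ++ xs := by
  intro xs
  induction xs with
  | nil => intro acc _ _; simp
  | cons x xs ih =>
    intro acc hacc hp
    obtain ⟨hx, hp'⟩ := List.pairwise_cons.mp hp
    have h1 : PySem.List.insertBy before x acc = acc ++ [x] :=
      PySem.List.insertBy_of_forall_not_before _ _ _ (hacc x (List.mem_cons_self ..))
    simp only [List.foldl_cons, h1]
    rw [ih (acc ++ [x]) ?_ hp']
    · simp
    · intro z hz y hy
      rcases List.mem_append.mp hy with h' | h'
      · exact hacc z (List.mem_cons_of_mem _ hz) y h'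
      · simp at h'; subst h'; exact hx z hz

theorem pv_sorted2_eq_self (l : List (Int × Int))
    (h : l.Pairwise (fun p q => p.1 ≤ q.1 ∧ p.2 ≤ q.2)) :
    PySem.List.sorted2 l Prod.fst Prod.snd false = l := by
  have hmain := pv_foldl_insertBy_eq
    (fun (a b : Int × Int) => decide (a.1 < b.1) || (!decide (b.1 < a.1) && decide (a.2 < b.2)))
    l [] (by simp) ?_
  · simpa [PySem.List.sorted2] using hmain
  · refine h.imp ?_
    rintro p q ⟨h1, h2⟩
    simp only [Bool.or_eq_false_iff, Bool.and_eq_false_iff, decide_eq_false_iff_not,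
      Bool.not_eq_false', decide_eq_true_eq, not_lt]
    omega

def pvStep (merged : List (Int × Int)) (se : Int × Int) : List (Int × Int) :=
  match merged with
  | [] => [se]
  | last :: tl =>
    if se.1 ≤ last.2 + 1 then (last.1, max last.2 se.2) :: tl
    else se :: last :: tl

def pvCov (l : List (Int × Int)) (j : Int) : Prop := ∃ p ∈ l, p.1 ≤ j ∧ j ≤ p.2

@[simp] theorem pvCov_nil (j : Int) : pvCov [] j ↔ False := by simp [pvCov]

@[simp] theorem pvCov_cons (p : Int × Int) (l : List (Int × Int)) (j : Int) :
    pvCov (p :: l) j ↔ (p.1 ≤ j ∧ j ≤ p.2) ∨ pvCov l j := by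
  simp [pvCov, List.mem_cons, or_and_right, exists_or]

theorem pv_mergeLoop_spec (N : Int) :
    ∀ (rest : List (Int × Int)) (hd : Int × Int) (tl : List (Int × Int)),
    (∀ p ∈ hd :: tl, 0 ≤ p.1 ∧ p.1 ≤ p.2 ∧ p.2 ≤ N - 1) →
    (hd :: tl).Pairwise (fun p q => q.2 + 1 < p.1) →
    (∀ p ∈ rest, 0 ≤ p.1 ∧ p.1 ≤ p.2 ∧ p.2 ≤ N - 1) →
    rest.Pairwise (fun p q => p.1 ≤ q.1) →
    (∀ p ∈ rest, hd.1 ≤ p.1) →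
    ∃ hd' tl', rest.foldl pvStep (hd :: tl) = hd' :: tl' ∧
      (∀ p ∈ hd' :: tl', 0 ≤ p.1 ∧ p.1 ≤ p.2 ∧ p.2 ≤ N - 1) ∧
      (hd' :: tl').Pairwise (fun p q => q.2 + 1 < p.1) ∧
      (∀ j : Int, pvCov (hd' :: tl') j ↔ pvCov (hd :: tl) j ∨ pvCov rest j) := by
  intro rest
  induction rest with
  | nil => intro hd tl hb hp _ _ _; exact ⟨hd, tl, rfl, hb, hp, by simp⟩
  | cons x rest ih =>
    intro hd tl hb hp hrb hrp hge
    obtain ⟨hxr, hrp'⟩ := List.pairwise_cons.mp hrp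
    have hxb := hrb x (List.mem_cons_self ..)
    have hhdb := hb hd (List.mem_cons_self ..)
    have hhdx : hd.1 ≤ x.1 := hge x (List.mem_cons_self ..)
    simp only [List.foldl_cons]
    by_cases hc : x.1 ≤ hd.2 + 1
    · have hstep : pvStep (hd :: tl) x = (hd.1, max hd.2 x.2) :: tl := by
        simp [pvStep, hc]
      rw [hstep]
      have hbnd : ∀ p ∈ (hd.1, max hd.2 x.2) :: tl, 0 ≤ p.1 ∧ p.1 ≤ p.2 ∧ p.2 ≤ N - 1 := by
        intro p hp''
        rcases List.mem_cons.mp hp'' with rfl | hp''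
        · exact ⟨hhdb.1, by omega, by omega⟩
        · exact hb p (List.mem_cons_of_mem _ hp'')
      have hpw : ((hd.1, max hd.2 x.2) :: tl).Pairwise (fun p q => q.2 + 1 < p.1) := by
        rw [List.pairwise_cons] at hp ⊢
        exact ⟨fun q hq => hp.1 q hq, hp.2⟩
      obtain ⟨hd', tl', heq, hb', hp', hcov⟩ := ih (hd.1, max hd.2 x.2) tl hbnd hpw
        (fun p hp'' => hrb p (List.mem_cons_of_mem _ hp'')) hrp'
        (fun p hp'' => le_trans hhdx (hxr p hp''))
      refine ⟨hd', tl', heq, hb', hp', ?_⟩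
      intro j
      rw [hcov j]
      simp only [pvCov_cons]
      have harith : (hd.1 ≤ j ∧ j ≤ max hd.2 x.2) ↔
          ((hd.1 ≤ j ∧ j ≤ hd.2) ∨ (x.1 ≤ j ∧ j ≤ x.2)) := by omega
      rw [harith]; tauto
    · have hstep : pvStep (hd :: tl) x = x :: hd :: tl := by
        simp [pvStep, hc]
      rw [hstep]
      have hbnd : ∀ p ∈ x :: hd :: tl, 0 ≤ p.1 ∧ p.1 ≤ p.2 ∧ p.2 ≤ N - 1 := by
        intro p hp''
        rcases List.mem_cons.mp hp'' with rfl | hp''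
        · exact hxb
        · exact hb p hp''
      have hpw : (x :: hd :: tl).Pairwise (fun p q => q.2 + 1 < p.1) := by
        rw [List.pairwise_cons]
        constructor
        · intro q hq
          rcases List.mem_cons.mp hq with rfl | hq
          · omega
          · have := (List.pairwise_cons.mp hp).1 q hq
            omega
        · exact hp
      obtain ⟨hd', tl', heq, hb', hp', hcov⟩ := ih x (hd :: tl) hbnd hpw
        (fun p hp'' => hrb p (List.mem_cons_of_mem _ hp'')) hrp' hxr
      refine ⟨hd', tl', heq, hb', hp', ?_⟩
      intro j
      rw [hcov j]
      simp only [pvCov_cons]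
      tauto

theorem pv_mergeLoop_nomerge :
    ∀ (rest : List (Int × Int)) (hd : Int × Int) (tl : List (Int × Int)),
    (hd :: rest).Pairwise (fun p q => p.2 + 1 < q.1) →
    rest.foldl pvStep (hd :: tl) = rest.reverse ++ hd :: tl := by
  intro rest
  induction rest with
  | nil => intro hd tl _; simp
  | cons x rest ih =>
    intro hd tl hp
    obtain ⟨hhd, hp'⟩ := List.pairwise_cons.mp hp
    have hx : hd.2 + 1 < x.1 := hhd x (List.mem_cons_self ..)
    have hstep : pvStep (hd :: tl) x = x :: hd :: tl := by
      simp only [pvStep, if_neg (by omega : ¬ x.1 ≤ hd.2 + 1)]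
    simp only [List.foldl_cons, hstep]
    rw [ih x (hd :: tl) hp']
    simp

theorem pv_clampIdx_int (n : Nat) (i : Int) :
    ((PySem.List.clampIdx n i : Nat) : Int) = if i < 0 then max ((n : Int) + i) 0 else min i n := by
  simp only [PySem.List.clampIdx]
  split_ifs <;> push_cast <;> omega

theorem pv_slice_eq_nil (xs : List String) (a b : Int)
    (h : PySem.List.clampIdx xs.length b ≤ PySem.List.clampIdx xs.length a) :
    PySem.List.slice xs (some a) (some b) = [] := by
  simp only [PySem.List.slice]
  rw [Nat.sub_eq_zero_of_le h, List.take_zero]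

theorem pv_slice_ne_nil (xs : List String) (a b : Int)
    (h : PySem.List.clampIdx xs.length a < PySem.List.clampIdx xs.length b)
    (h2 : PySem.List.clampIdx xs.length a < xs.length) :
    PySem.List.slice xs (some a) (some b) ≠ [] := by
  simp only [PySem.List.slice]
  intro hnil
  rcases List.take_eq_nil_iff.mp hnil with h' | h'
  · omega
  · rw [List.drop_eq_nil_iff] at h'
    omega

theorem pv_slice_eq_map_range (lines : List String) (a b : Int)
    (h0 : 0 ≤ a) (hab : a ≤ b) (hb : b ≤ (lines.length : Int)) :
    PySem.List.slice lines (some a) (some b)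
      = (PySem.List.pyRange a b 1).map (fun j => PySem.List.pyGetD lines j "") := by
  rw [PySem.List.slice_toNat lines h0 (le_trans h0 hab)]
  have h1 : (PySem.List.pyRange a b 1).map (fun j => PySem.List.pyGetD lines j "") ++
      (PySem.List.pyRange b (lines.length : Int) 1).map (fun j => PySem.List.pyGetD lines j "")
      = lines.drop a.toNat := by
    rw [← List.map_append, ← PySem.List.pyRange_one_append a b (lines.length : Int) hab hb]
    simpa using PySem.List.map_pyGetD_pyRange lines "" h0
  have h2 : b.toNat - a.toNat
      = ((PySem.List.pyRange a b 1).map (fun j => PySem.List.pyGetD lines j "")).length := by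
    simp [PySem.List.length_pyRange_one]
    omega
  rw [h2, ← h1, List.take_left]

theorem pv_flatMap_pairwise (l : List (Int × Int))
    (h : l.Pairwise (fun p q => p.2 + 1 < q.1)) :
    (l.flatMap (fun p => PySem.List.pyRange p.1 (p.2 + 1) 1)).Pairwise (· < ·) := by
  induction l with
  | nil => simp
  | cons p l ih =>
    obtain ⟨hp, hp'⟩ := List.pairwise_cons.mp h
    simp only [List.flatMap_cons]
    rw [List.pairwise_append]
    refine ⟨PySem.List.pairwise_lt_pyRange_one _ _, ih hp', ?_⟩
    intro a ha b hb
    rw [PySem.List.mem_pyRange_one] at ha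
    rcases List.mem_flatMap.mp hb with ⟨q, hq, hbq⟩
    rw [PySem.List.mem_pyRange_one] at hbq
    have := hp q hq
    omega

theorem pv_mem_flatMap_iff (l : List (Int × Int)) (j : Int) :
    j ∈ l.flatMap (fun p => PySem.List.pyRange p.1 (p.2 + 1) 1) ↔ pvCov l j := by
  simp only [List.mem_flatMap, PySem.List.mem_pyRange_one, pvCov]
  constructor
  · rintro ⟨p, hp, h1, h2⟩; exact ⟨p, hp, h1, by omega⟩
  · rintro ⟨p, hp, h1, h2⟩; exact ⟨p, hp, h1, by omega⟩

def pvIvl (c N i : Int) : Int × Int := (max 0 (i - c), min (N - 1) (i + c))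

@[simp] theorem pvCov_reverse (l : List (Int × Int)) (j : Int) :
    pvCov l.reverse j ↔ pvCov l j := by simp [pvCov]

theorem pv_hits_pairwise (lines : List String) (q : Int × String → Bool) :
    (((PySem.List.enumerate lines).filter q).map Prod.fst).Pairwise (· < ·) := by
  rw [List.pairwise_map]
  exact (PySem.List.pairwise_lt_enumerate lines 0).filter q

theorem pv_hits_bounds (lines : List String) (q : Int × String → Bool) :
    ∀ i ∈ ((PySem.List.enumerate lines).filter q).map Prod.fst,
      0 ≤ i ∧ i < (lines.length : Int) := by
  intro i hi
  rcases List.mem_map.mp hi with ⟨p, hp, rfl⟩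
  have hp' := List.mem_of_mem_filter hp
  rcases (PySem.List.mem_enumerate_iff lines 0 p).mp hp' with ⟨k, hk, rfl⟩
  simp
  omega

theorem pv_lex_pairwise (t : List Int) (c N : Int) (hpw : t.Pairwise (· < ·)) :
    (t.map (pvIvl c N)).Pairwise (fun p q => p.1 ≤ q.1 ∧ p.2 ≤ q.2) := by
  rw [List.pairwise_map]
  refine hpw.imp ?_
  intro a b hab
  simp only [pvIvl]
  constructor <;> simp <;> omega

theorem pv_neg_sep (t : List Int) (c N : Int) (hc : c < 0)
    (hb : ∀ i ∈ t, 0 ≤ i ∧ i < N) (hpw : t.Pairwise (· < ·)) :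
    (t.map (pvIvl c N)).Pairwise (fun p q => p.2 + 1 < q.1) := by
  rw [List.pairwise_map]
  rw [List.pairwise_iff_forall_sublist] at hpw ⊢
  intro a b hs
  have ha := hb a (hs.subset (by simp))
  have hb' := hb b (hs.subset (by simp))
  have := hpw hs
  simp only [pvIvl]
  omega

theorem pv_alt_filter (lines : List String) (cov : Int → Bool) :
    (((PySem.List.enumerate lines).filter (fun p => cov p.1)).map Prod.snd)
      = ((PySem.List.pyRange 0 (lines.length : Int) 1).filter cov).map
          (fun j => PySem.List.pyGetD lines j "") := by
  rw [PySem.List.enumerate_eq_map_pyRange lines ""]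
  rw [List.filter_map, List.map_map]
  rfl

theorem pv_foldl_slice_eq_map (lines : List String) (l : List (Int × Int))
    (h : ∀ p ∈ l, 0 ≤ p.1 ∧ p.1 ≤ p.2 + 1 ∧ p.2 + 1 ≤ (lines.length : Int)) :
    l.foldl (fun out se => out ++ PySem.List.slice lines (some se.1) (some (se.2 + 1))) []
      = ((l.flatMap (fun p => PySem.List.pyRange p.1 (p.2 + 1) 1)).map
          (fun j => PySem.List.pyGetD lines j "")) := by
  rw [PySem.List.foldl_append_eq_flatMap, List.nil_append, List.map_flatMap]
  induction l with
  | nil => simp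
  | cons p l ih =>
    simp only [List.flatMap_cons]
    have hp := h p (List.mem_cons_self ..)
    rw [pv_slice_eq_map_range lines p.1 (p.2 + 1) hp.1 hp.2.1 hp.2.2]
    rw [ih (fun q hq => h q (List.mem_cons_of_mem _ hq))]

theorem pv_step_eq : (fun (merged : List (Int × Int)) (se : Int × Int) =>
    match merged with
    | [] => [se]
    | last :: tl =>
      if se.1 ≤ last.2 + 1 then (last.1, max last.2 se.2) :: tl
      else se :: last :: tl) = pvStep := rfl

theorem pv_merge_of_sorted (N : Int) (l : List (Int × Int))
    (hlex : l.Pairwise (fun p q => p.1 ≤ q.1 ∧ p.2 ≤ q.2))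
    (hb : ∀ p ∈ l, 0 ≤ p.1 ∧ p.1 ≤ p.2 ∧ p.2 ≤ N - 1)
    (hne : l ≠ []) :
    ∃ M : List (Int × Int), pvMergeIntervals l = M ∧
      (M.Pairwise (fun p q => p.2 + 1 < q.1)) ∧
      (∀ p ∈ M, 0 ≤ p.1 ∧ p.1 ≤ p.2 ∧ p.2 ≤ N - 1) ∧
      (∀ j : Int, pvCov M j ↔ pvCov l j) := by
  obtain ⟨iv0, ivrest, rfl⟩ := List.exists_cons_of_ne_nil hne
  obtain ⟨hlex0, hlex'⟩ := List.pairwise_cons.mp hlex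
  obtain ⟨hd', tl', heq, hb', hp', hcov⟩ := pv_mergeLoop_spec N ivrest iv0 []
    (by intro p hp; rcases List.mem_cons.mp hp with rfl | hp
        · exact hb p (List.mem_cons_self ..)
        · simp at hp)
    (by simp)
    (fun p hp => hb p (List.mem_cons_of_mem _ hp))
    (hlex'.imp fun h => h.1)
    (fun p hp => (hlex0 p hp).1)
  refine ⟨(hd' :: tl').reverse, ?_, ?_, ?_, ?_⟩
  · unfold pvMergeIntervals
    rw [if_neg (List.cons_ne_nil _ _), pv_sorted2_eq_self _ hlex]
    simp only [pv_step_eq]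
    rw [heq]
  · rw [List.pairwise_reverse]
    exact hp'
  · intro p hp
    exact hb' p (List.mem_reverse.mp hp)
  · intro j
    rw [pvCov_reverse, hcov j]
    simp only [pvCov_cons, pvCov_nil]
    tauto

theorem pv_merge_of_sep (l : List (Int × Int))
    (hlex : l.Pairwise (fun p q => p.1 ≤ q.1 ∧ p.2 ≤ q.2))
    (hsep : l.Pairwise (fun p q => p.2 + 1 < q.1))
    (hne : l ≠ []) :
    pvMergeIntervals l = l := by
  obtain ⟨iv0, ivrest, rfl⟩ := List.exists_cons_of_ne_nil hne
  unfold pvMergeIntervals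
  rw [if_neg (List.cons_ne_nil _ _), pv_sorted2_eq_self _ hlex]
  simp only [pv_step_eq]
  rw [pv_mergeLoop_nomerge ivrest iv0 [] hsep]
  simp

theorem pv_cov_bridge (t : List Int) (c N j : Int) (_hc : 0 ≤ c)
    (hb : ∀ i ∈ t, 0 ≤ i ∧ i < N) :
    pvCov (t.map (pvIvl c N)) j ↔
      ((0 ≤ j ∧ j < N) ∧
        (t.any (fun i => decide (i - c ≤ j) && decide (j ≤ i + c)) = true)) := by
  simp only [pvCov, List.mem_map, List.any_eq_true, Bool.and_eq_true, decide_eq_true_eq]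
  constructor
  · rintro ⟨p, ⟨i, hi, rfl⟩, h1, h2⟩
    have := hb i hi
    simp only [pvIvl] at h1 h2
    exact ⟨⟨by omega, by omega⟩, i, hi, by omega, by omega⟩
  · rintro ⟨⟨hj0, hjN⟩, i, hi, h1, h2⟩
    have := hb i hi
    refine ⟨pvIvl c N i, ⟨i, hi, rfl⟩, ?_, ?_⟩ <;> simp only [pvIvl] <;> omega

theorem pv_clampIdx_spec (n : Nat) (i : Int) :
    (i < 0 → ((PySem.List.clampIdx n i : Nat) : Int) = max ((n : Int) + i) 0) ∧
    (0 ≤ i → ((PySem.List.clampIdx n i : Nat) : Int) = min i n) := by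
  constructor <;> intro h <;> rw [pv_clampIdx_int] <;> simp [h]

theorem pv_branch_pos (lines : List String) (t : List Int) (c : Int)
    (hc : 0 ≤ c) (hne : t ≠ [])
    (hb : ∀ i ∈ t, 0 ≤ i ∧ i < (lines.length : Int))
    (hpw : t.Pairwise (· < ·)) :
    (pvMergeIntervals (t.map (pvIvl c (lines.length : Int)))).foldl
        (fun out se => out ++ PySem.List.slice lines (some se.1) (some (se.2 + 1))) []
      = ((PySem.List.enumerate lines).filter
          (fun p => t.any (fun i => decide (i - c ≤ p.1) && decide (p.1 ≤ i + c)))).map Prod.snd := by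
  have hlex := pv_lex_pairwise t c (lines.length : Int) hpw
  have hbint : ∀ p ∈ t.map (pvIvl c (lines.length : Int)),
      0 ≤ p.1 ∧ p.1 ≤ p.2 ∧ p.2 ≤ (lines.length : Int) - 1 := by
    intro p hp
    rcases List.mem_map.mp hp with ⟨i, hi, rfl⟩
    have := hb i hi
    simp only [pvIvl]
    omega
  obtain ⟨M, hM, hsep, hbM, hcov⟩ := pv_merge_of_sorted (lines.length : Int) _ hlex hbint
    (by simpa using hne)
  rw [hM]
  rw [pv_foldl_slice_eq_map lines M (fun p hp => by have := hbM p hp; omega)]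
  rw [pv_alt_filter lines (fun j => t.any (fun i => decide (i - c ≤ j) && decide (j ≤ i + c)))]
  congr 1
  apply pv_eq_of_pairwise_lt_of_mem_iff (pv_flatMap_pairwise M hsep)
    ((PySem.List.pairwise_lt_pyRange_one 0 (lines.length : Int)).filter _)
  intro j
  rw [pv_mem_flatMap_iff, hcov j, pv_cov_bridge t c (lines.length : Int) j hc hb,
    List.mem_filter, PySem.List.mem_pyRange_one]

theorem pv_branch_neg_A (lines : List String) (t : List Int) (c : Int)
    (hc : c < 0) (hne : t ≠ [])
    (hb : ∀ i ∈ t, 0 ≤ i ∧ i < (lines.length : Int))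
    (hpw : t.Pairwise (· < ·))
    (hbig : 2 * (-c) ≤ (lines.length : Int) → ∀ i ∈ t, -c - 1 ≤ i) :
    (pvMergeIntervals (t.map (pvIvl c (lines.length : Int)))).foldl
        (fun out se => out ++ PySem.List.slice lines (some se.1) (some (se.2 + 1))) [] = [] := by
  rw [pv_merge_of_sep _ (pv_lex_pairwise t c _ hpw) (pv_neg_sep t c _ hc hb hpw)
    (by simpa using hne)]
  rw [PySem.List.foldl_append_eq_flatMap, List.nil_append]
  apply List.flatMap_eq_nil_iff.mpr
  intro p hp
  rcases List.mem_map.mp hp with ⟨i, hi, rfl⟩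
  have hbi := hb i hi
  apply pv_slice_eq_nil
  have h1 := pv_clampIdx_spec lines.length (min ((lines.length : Int) - 1) (i + c) + 1)
  have h2 := pv_clampIdx_spec lines.length (max 0 (i - c))
  simp only [pvIvl]
  by_cases hN : 2 * (-c) ≤ (lines.length : Int)
  · have := hbig hN i hi
    omega
  · omega

theorem pv_branch_neg_B (lines : List String) (t : List Int) (c : Int) (hc : c < 0) :
    ((PySem.List.enumerate lines).filter
        (fun p => t.any (fun i => decide (i - c ≤ p.1) && decide (p.1 ≤ i + c)))).map Prod.snd
      = [] := by
  rw [List.filter_eq_nil_iff.mpr, List.map_nil]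
  intro p _
  simp only [List.any_eq_true, Bool.and_eq_true, decide_eq_true_eq, not_exists, not_and]
  intro i _
  omega

theorem pv_main (lines : List String) (needle : String) (c : Int)
    (hnd : ¬ D_grep_context_py lines needle c) :
    grep_context_py lines needle c = grep_context_py_alt lines needle c := by
  by_cases hnil : lines = []
  · simp [grep_context_py, grep_context_py_alt, hnil]
  simp only [grep_context_py, grep_context_py_alt, if_neg hnil, PySem.List.len_eq]
  set t := ((PySem.List.enumerate lines).filter
      (fun p => PySem.Str.isIn (PySem.Str.lower needle) (PySem.Str.lower p.2))).map Prod.fst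
    with ht
  by_cases hT : t = []
  · rw [if_pos hT, if_pos hT]
  rw [if_neg hT, if_neg hT]
  have hIv : (t.foldl (fun acc i =>
      acc ++ [(max 0 (i - c), min ((lines.length : Int) - 1) (i + c))]) [])
      = t.map (pvIvl c (lines.length : Int)) := by
    rw [PySem.List.foldl_append_singleton_eq_map
      (f := fun i => (max 0 (i - c), min ((lines.length : Int) - 1) (i + c)))]
    rfl
  rw [hIv]
  have hbnd : ∀ i ∈ t, 0 ≤ i ∧ i < (lines.length : Int) := by
    rw [ht]; exact pv_hits_bounds lines _
  have hpw : t.Pairwise (· < ·) := by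
    rw [ht]; exact pv_hits_pairwise lines _
  by_cases hc : 0 ≤ c
  · exact pv_branch_pos lines t c hc hT hbnd hpw
  · push Not at hc
    rw [pv_branch_neg_A lines t c hc hT hbnd hpw ?_, pv_branch_neg_B lines t c hc]
    intro hN i hi
    by_contra hlt
    push Not at hlt
    apply hnd
    refine ⟨hc, hN, ?_⟩
    rcases List.mem_map.mp (ht ▸ hi) with ⟨p, hp, rfl⟩
    exact ⟨p, List.mem_of_mem_filter hp, by omega, by simpa using List.of_mem_filter hp⟩

-- ===== VERDICT (by name: the statement is the Claim_ definition above) =====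
theorem grep_context_py_spec : Claim_unchanged_grep_context_py := by
  intro lines needle c _ hnd
  exact pv_main lines needle c hnd

theorem grep_context_py_changed : Claim_changed_grep_context_py := by
  unfold Claim_changed_grep_context_py; decide

theorem grep_context_py_tight : Claim_exact_grep_context_py := by
  intro lines needle c _ hd
  obtain ⟨hc, hN, p, hpe, hplt, hpred⟩ := hd
  have hnil : lines ≠ [] := by
    intro h
    subst h
    simp [PySem.List.enumerate] at hpe
  obtain ⟨k, hk, hpk⟩ := (PySem.List.mem_enumerate_iff lines 0 p).mp hpe
  have hp1 : 0 ≤ p.1 ∧ p.1 < (lines.length : Int) := by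
    rw [hpk]; simp; omega
  simp only [grep_context_py, grep_context_py_alt, if_neg hnil, PySem.List.len_eq]
  set t := ((PySem.List.enumerate lines).filter
      (fun p => PySem.Str.isIn (PySem.Str.lower needle) (PySem.Str.lower p.2))).map Prod.fst
    with ht
  have hit : p.1 ∈ t := by
    rw [ht]; exact List.mem_map.mpr ⟨p, List.mem_filter.mpr ⟨hpe, hpred⟩, rfl⟩
  have hT : t ≠ [] := fun h => by simp [h] at hit
  rw [if_neg hT, if_neg hT]
  have hIv : (t.foldl (fun acc i =>
      acc ++ [(max 0 (i - c), min ((lines.length : Int) - 1) (i + c))]) [])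
      = t.map (pvIvl c (lines.length : Int)) := by
    rw [PySem.List.foldl_append_singleton_eq_map
      (f := fun i => (max 0 (i - c), min ((lines.length : Int) - 1) (i + c)))]
    rfl
  rw [hIv]
  have hbnd : ∀ i ∈ t, 0 ≤ i ∧ i < (lines.length : Int) := by
    rw [ht]; exact pv_hits_bounds lines _
  have hpw : t.Pairwise (· < ·) := by
    rw [ht]; exact pv_hits_pairwise lines _
  rw [pv_branch_neg_B lines t c hc]
  rw [pv_merge_of_sep _ (pv_lex_pairwise t c _ hpw) (pv_neg_sep t c _ hc hbnd hpw)
    (by simpa using hT)]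
  rw [PySem.List.foldl_append_eq_flatMap, List.nil_append]
  intro hcontra
  have hsl := List.flatMap_eq_nil_iff.mp hcontra (pvIvl c (lines.length : Int) p.1)
    (List.mem_map.mpr ⟨p.1, hit, rfl⟩)
  refine absurd hsl (pv_slice_ne_nil lines _ _ ?_ ?_)
  · have h1 := pv_clampIdx_spec lines.length ((pvIvl c (lines.length : Int) p.1).1)
    have h2 := pv_clampIdx_spec lines.length ((pvIvl c (lines.length : Int) p.1).2 + 1)
    simp only [pvIvl] at h1 h2 ⊢
    omega
  · have h1 := pv_clampIdx_spec lines.length ((pvIvl c (lines.length : Int) p.1).1)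
    simp only [pvIvl] at h1 ⊢
    omega
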